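-- pv_equiv track=rewrite | github.com/ManalHamdi/Converting-Map-Image-To-Graph-Representation-For-A-Map-Helper-App | DetectIntersections.py | IsNeighbour
-- ===== SOURCE A (Python) =====
-- def IsNeighbour(point1, point2):
-- 	for i in range(-1, 2):
-- 		for j in range(-1, 2):
-- 			if (i == 0 and j == 0):
-- 				continue
-- 			if (point1[0] == point2[0] + i and point1[1] == point2[1] + j):
-- 				return True
-- 	return False
-- ===== SOURCE B (Python) =====
-- def IsNeighbour(point1, point2):
-- 	dx = point1[0] - point2[0]
-- 	dy = point1[1] - point2[1]
-- 	return dx in (-1, 0, 1) and dy in (-1, 0, 1) and not (dx == 0 and dy == 0)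
-- ===== Notes on version B (the rewrite author's own statement) =====
-- stated objective: simpler
-- what changed: Replaces the nested 3x3 offset enumeration with one closed-form boolean over the coordinate differences dx, dy.
import Mathlib
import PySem

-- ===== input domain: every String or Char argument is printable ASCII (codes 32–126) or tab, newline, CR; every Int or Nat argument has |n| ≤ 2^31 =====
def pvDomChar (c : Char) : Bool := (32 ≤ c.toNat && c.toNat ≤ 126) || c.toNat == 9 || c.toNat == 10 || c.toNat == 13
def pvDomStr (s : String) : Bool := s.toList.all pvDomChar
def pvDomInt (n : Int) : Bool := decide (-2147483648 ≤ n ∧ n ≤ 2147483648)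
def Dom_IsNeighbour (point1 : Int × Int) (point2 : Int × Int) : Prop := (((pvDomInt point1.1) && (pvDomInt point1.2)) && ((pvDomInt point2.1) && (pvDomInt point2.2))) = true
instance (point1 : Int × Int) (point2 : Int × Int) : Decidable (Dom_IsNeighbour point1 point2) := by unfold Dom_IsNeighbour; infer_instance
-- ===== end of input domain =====

-- B replaces the nested 3x3 offset loop with one closed-form boolean over dx, dy (simpler).

-- ===== PORT A =====
-- literal port of A: fold over range(-1,2)×range(-1,2); early 'return True' becomes an or-accumulator
def IsNeighbour (point1 : Int × Int) (point2 : Int × Int) : Bool :=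
  (PySem.List.pyRange (-1) 2 1).foldl (fun acc i =>
    (PySem.List.pyRange (-1) 2 1).foldl (fun acc j =>
      if i == 0 && j == 0 then acc
      else if point1.1 == point2.1 + i && point1.2 == point2.2 + j then true
      else acc) acc) false

-- ===== PORT B =====
def IsNeighbour_alt (point1 : Int × Int) (point2 : Int × Int) : Bool :=
  let dx := point1.1 - point2.1
  let dy := point1.2 - point2.2
  (dx == -1 || dx == 0 || dx == 1) && (dy == -1 || dy == 0 || dy == 1)
    && !(dx == 0 && dy == 0)

-- ===== PRECONDITION & SPEC =====
def Spec_IsNeighbour (point1 : Int × Int) (point2 : Int × Int) (out : Bool) : Prop := out = IsNeighbour_alt point1 point2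
instance (point1 : Int × Int) (point2 : Int × Int) (out : Bool) : Decidable (Spec_IsNeighbour point1 point2 out) := by unfold Spec_IsNeighbour; infer_instance

-- ===== CLAIM (what is proved, stated in full; the proofs are below) =====
def Claim_equal_IsNeighbour : Prop := ∀ (point1 : Int × Int) (point2 : Int × Int), Dom_IsNeighbour point1 point2 → Spec_IsNeighbour point1 point2 (IsNeighbour point1 point2)

-- ===== LEMMAS AND PROOFS =====

-- ===== VERDICT (by name: the statement is the Claim_ definition above) =====
theorem IsNeighbour_spec : Claim_equal_IsNeighbour := by
  intro ⟨x1, y1⟩ ⟨x2, y2⟩ _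
  unfold Spec_IsNeighbour IsNeighbour IsNeighbour_alt
  have h : PySem.List.pyRange (-1) 2 1 = [-1, 0, 1] := by decide
  have inner : ∀ (i : Int) (acc : Bool),
      ([-1, 0, 1] : List Int).foldl (fun acc j =>
        if i == 0 && j == 0 then acc
        else if x1 == x2 + i && y1 == y2 + j then true
        else acc) acc
      = (acc || ([-1, 0, 1] : List Int).any
          (fun j => !(i == 0 && j == 0) && (x1 == x2 + i && y1 == y2 + j))) := by
    intro i acc
    calc ([-1, 0, 1] : List Int).foldl (fun acc j =>
            if i == 0 && j == 0 then acc
            else if x1 == x2 + i && y1 == y2 + j then true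
            else acc) acc
        = ([-1, 0, 1] : List Int).foldl (fun ok j =>
            if !(i == 0 && j == 0) && (x1 == x2 + i && y1 == y2 + j) then true
            else ok) acc := by
          apply PySem.List.foldl_congr_mem
          intro a j _
          cases h0 : (i == 0 && j == 0) <;> cases hc : (x1 == x2 + i && y1 == y2 + j) <;>
            simp
      _ = _ := PySem.List.foldl_if_true_eq _ _ _
  rw [h]
  simp only [inner]
  simp only [List.foldl_cons, List.foldl_nil]
  rw [Bool.eq_iff_iff]
  simp only [List.any_cons, List.any_nil, Bool.or_eq_true, Bool.and_eq_true,
    Bool.not_eq_true', beq_iff_eq, Bool.or_false, Bool.false_or,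
    Bool.and_eq_false_iff, beq_eq_false_iff_ne, ne_eq]
  norm_num
  omega
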